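-- pv_equiv track=rewrite | github.com/Aasthaengg/IBMdataset | Python_codes/p03228/s511513027.py | solve
-- ===== SOURCE A (Python) =====
-- def solve(A, B, K):
--     turn = 'takahashi'
--     for _ in range(K):
--         if turn == 'takahashi':
--             A -= (A % 2)
--             A //= 2
--             B += A
--             turn = 'aoki'
--         else:
--             B -= (B % 2)
--             B //= 2
--             A += B
--             turn = 'takahashi'
--     return A, B
-- ===== SOURCE B (Python) =====
-- def solve(A, B, K):
--     # Cycle detection: the state (a, b, turn) eventually repeats; once a
--     # repeat is found, reduce the remaining turns modulo the cycle length.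
--     def step(a, b, tk):
--         if tk:
--             a //= 2
--             return a, b + a, False
--         else:
--             b //= 2
--             return a + b, b, True
--
--     seen = {}
--     a, b, tk = A, B, True
--     t = 0
--     while t < K:
--         key = (a, b, tk)
--         if key in seen:
--             rem = (K - t) % (t - seen[key])
--             for _ in range(rem):
--                 a, b, tk = step(a, b, tk)
--             return a, b
--         seen[key] = t
--         a, b, tk = step(a, b, tk)
--         t += 1
--     return a, b
-- ===== Notes on version B (the rewrite author's own statement) =====
-- stated objective: faster
-- what changed: Instead of simulating all K turns, B records each (A,B,turn) state with its time in a dict, detects the first repeated state, and jumps over the cycle by reducing the remaining turns modulo the cycle length, then simulates only the remainder.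
import Mathlib
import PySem

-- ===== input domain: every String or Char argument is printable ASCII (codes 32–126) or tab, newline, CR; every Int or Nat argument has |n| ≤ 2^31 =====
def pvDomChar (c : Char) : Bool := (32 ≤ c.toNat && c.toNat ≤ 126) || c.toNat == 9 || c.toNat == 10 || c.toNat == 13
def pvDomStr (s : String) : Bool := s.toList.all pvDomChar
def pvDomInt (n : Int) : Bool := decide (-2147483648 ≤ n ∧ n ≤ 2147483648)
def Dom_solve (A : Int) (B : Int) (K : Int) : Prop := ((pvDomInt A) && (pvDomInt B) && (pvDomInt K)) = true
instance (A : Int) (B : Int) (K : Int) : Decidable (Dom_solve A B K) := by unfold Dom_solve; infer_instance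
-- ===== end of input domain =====

-- B replaces the K-step simulation by cycle detection on the (A,B,turn) state,
-- reducing the remaining turns modulo the cycle length (objective: faster).

-- ===== PORT A =====
-- one loop body of A (state = (A, B, turn), turn is the Python string)
def solveStepA (s : Int × Int × String) : Int × Int × String :=
  if s.2.2 == "takahashi" then
    let A1 := s.1 - PySem.Int.mod s.1 2
    let A2 := PySem.Int.floordiv A1 2
    (A2, s.2.1 + A2, "aoki")
  else
    let B1 := s.2.1 - PySem.Int.mod s.2.1 2
    let B2 := PySem.Int.floordiv B1 2
    (s.1 + B2, B2, "takahashi")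

def solve (A : Int) (B : Int) (K : Int) : List Int :=
  let r := (PySem.List.pyRange 0 K 1).foldl (fun s _ => solveStepA s) (A, B, "takahashi")
  [r.1, r.2.1]

-- ===== PORT B =====
-- step(a, b, tk) of Source B
def solveStepB (s : Int × Int × Bool) : Int × Int × Bool :=
  if s.2.2 then
    let a := PySem.Int.floordiv s.1 2
    (a, s.2.1 + a, false)
  else
    let b := PySem.Int.floordiv s.2.1 2
    (s.1 + b, b, true)

-- the 'while t < K' loop of Source B; fuel = (K - t).toNat makes the guard structural
def solveLoopB (seen : PySem.Dict (Int × Int × Bool) Int) (s : Int × Int × Bool)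
    (t : Int) (K : Int) : Nat → List Int
  | 0 => [s.1, s.2.1]
  | fuel + 1 =>
    match seen.get? s with
    | some t0 =>
      let rem := PySem.Int.mod (K - t) (t - t0)
      let s' := solveStepB^[rem.toNat] s
      [s'.1, s'.2.1]
    | none => solveLoopB (seen.insert s t) (solveStepB s) (t + 1) K fuel

def solve_alt (A : Int) (B : Int) (K : Int) : List Int :=
  solveLoopB PySem.Dict.empty (A, B, true) 0 K K.toNat

-- ===== PRECONDITION & SPEC =====
def Spec_solve (A : Int) (B : Int) (K : Int) (out : List Int) : Prop := out = solve_alt A B K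
instance (A : Int) (B : Int) (K : Int) (out : List Int) : Decidable (Spec_solve A B K out) := by unfold Spec_solve; infer_instance

-- ===== CLAIM (what is proved, stated in full; the proofs are below) =====
def Claim_equal_solve : Prop := ∀ (A : Int) (B : Int) (K : Int), Dom_solve A B K → Spec_solve A B K (solve A B K)

-- ===== LEMMAS AND PROOFS =====

-- embed B's Bool turn into A's String turn
def pvEmb (s : Int × Int × Bool) : Int × Int × String :=
  (s.1, s.2.1, if s.2.2 then "takahashi" else "aoki")

theorem pv_stepA_emb (s : Int × Int × Bool) :
    solveStepA (pvEmb s) = pvEmb (solveStepB s) := by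
  obtain ⟨a, b, tk⟩ := s
  cases tk <;> simp [solveStepA, solveStepB, pvEmb] <;> omega

theorem pv_foldA (l : List Int) (s : Int × Int × Bool) :
    l.foldl (fun s _ => solveStepA s) (pvEmb s) = pvEmb (solveStepB^[l.length] s) := by
  induction l generalizing s with
  | nil => rfl
  | cons x xs ih =>
      simp only [List.foldl_cons, List.length_cons, pv_stepA_emb,
        Function.iterate_succ_apply]
      exact ih (solveStepB s)

-- if y has period p under f, iterates of f at y reduce mod p
theorem pv_iterate_mod {α : Type} (f : α → α) (y : α) (p : Nat)
    (h : f^[p] y = y) (m : Nat) : f^[m] y = f^[m % p] y := by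
  conv_lhs => rw [← Nat.mod_add_div m p]
  rw [Function.iterate_add_apply, Function.iterate_mul, Function.iterate_fixed h (m / p)]

theorem pv_loopB_eq (s0 : Int × Int × Bool) (K : Int) :
    ∀ (fuel : Nat) (seen : PySem.Dict (Int × Int × Bool) Int) (t : Int),
      0 ≤ t → fuel = (K - t).toNat → (t = 0 ∨ t ≤ K) →
      (∀ p ∈ seen.items, 0 ≤ p.2 ∧ p.2 < t ∧ p.1 = solveStepB^[p.2.toNat] s0) →
      solveLoopB seen (solveStepB^[t.toNat] s0) t K fuel =
        [(solveStepB^[K.toNat] s0).1, (solveStepB^[K.toNat] s0).2.1] := by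
  intro fuel
  induction fuel with
  | zero =>
      intro seen t ht hfuel hts _
      have : K.toNat = t.toNat := by omega
      simp [solveLoopB, this]
  | succ n ih =>
      intro seen t ht hfuel hts hseen
      have htK : t < K := by omega
      rw [solveLoopB]
      cases hget : seen.get? (solveStepB^[t.toNat] s0) with
      | none =>
          have h1 : (t + 1).toNat = t.toNat + 1 := by omega
          have := ih (seen.insert (solveStepB^[t.toNat] s0) t) (t + 1)
            (by omega) (by omega) (by omega)
            (by
              intro p hp
              rw [PySem.Dict.mem_items_insert] at hp
              rcases hp with hp | ⟨hp, _⟩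
              · subst hp; exact ⟨ht, by omega, rfl⟩
              · obtain ⟨h2, h3, h4⟩ := hseen p hp
                exact ⟨h2, by omega, h4⟩)
          rw [h1, Function.iterate_succ_apply'] at this
          exact this
      | some t0 =>
          have hmem := PySem.Dict.mem_items_of_get?_eq_some seen hget
          obtain ⟨h0, hlt, heq⟩ := hseen _ hmem
          simp only []
          set a := t0.toNat with ha
          set b := t.toNat with hb
          have hab : a < b := by omega
          set p := b - a with hpdef
          have hp : 0 < p := by omega
          set y := solveStepB^[a] s0 with hy
          have hper : solveStepB^[p] y = y := by
            rw [hy, ← Function.iterate_add_apply]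
            have hpa : p + a = b := by omega
            rw [hpa]
            exact heq
          have hrem : (PySem.Int.mod (K - t) (t - t0)).toNat = (K.toNat - b) % p := by
            rw [PySem.Int.mod_eq_emod_of_pos (by omega)]
            have h1 : K - t = ((K.toNat - b : Nat) : Int) := by omega
            have h2 : t - t0 = ((p : Nat) : Int) := by omega
            rw [h1, h2]
            omega
          rw [hrem]
          have hcur : solveStepB^[b] s0 = y := heq
          have hmain : solveStepB^[(K.toNat - b) % p] (solveStepB^[b] s0) = solveStepB^[K.toNat] s0 := by
            rw [hcur]
            have e1 : (K.toNat - b) % p = (K.toNat - a) % p := by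
              have e2 : K.toNat - a = (K.toNat - b) + p := by omega
              rw [e2, Nat.add_mod_right]
            rw [e1, ← pv_iterate_mod solveStepB y p hper (K.toNat - a), hy,
              ← Function.iterate_add_apply]
            congr 1
            omega
          rw [hmain]

theorem pv_empty_items :
    (PySem.Dict.empty : PySem.Dict (Int × Int × Bool) Int).items = [] := rfl

-- ===== VERDICT (by name: the statement is the Claim_ definition above) =====
theorem solve_spec : Claim_equal_solve := by
  intro A B K _
  unfold Spec_solve solve solve_alt
  have hB := pv_loopB_eq (A, B, true) K K.toNat PySem.Dict.empty 0
    (by omega) (by omega) (Or.inl rfl)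
    (by intro p hp; rw [pv_empty_items] at hp; cases hp)
  norm_num at hB
  rw [hB]
  have hA := pv_foldA (PySem.List.pyRange 0 K 1) (A, B, true)
  rw [PySem.List.length_pyRange_one] at hA
  have hK : (K - 0).toNat = K.toNat := by omega
  rw [hK] at hA
  simp only [show pvEmb (A, B, true) = (A, B, "takahashi") from rfl] at hA
  simp only [hA, pvEmb]
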